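-- pv_equiv track=rewrite | github.com/StefanIv21/Automatic-Timetable-Generator | orar.py | check_pauza
-- ===== SOURCE A (Python) =====
-- def check_pauza(orar,day,interval,teacher,hours):
--     list_intervals = []
--     nr = 0
--     for interval in orar[day].keys():
--         for  room in  orar[day][interval].keys():
--             value = orar[day][interval][room]
--             if value is not None and value[0] == teacher:
--                 list_intervals.append(interval)
--     for i in range(0,len(list_intervals)-1):
--         if list_intervals[i+1][0] - list_intervals[i][1] > hours:
--             nr += 1
--     return nr
-- ===== SOURCE B (Python) =====
-- def check_pauza(orar, day, interval, teacher, hours):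
--     prev = None
--     nr = 0
--     for interval, rooms in orar[day].items():
--         for value in rooms.values():
--             if value is not None and value[0] == teacher:
--                 if prev is not None and interval[0] - prev[1] > hours:
--                     nr += 1
--                 prev = interval
--     return nr
-- ===== Notes on version B (the rewrite author's own statement) =====
-- stated objective: simpler
-- what changed: B fuses A's two phases into one pass: instead of collecting list_intervals and then scanning adjacent pairs by index, B maintains a prev interval and a counter while iterating the day's schedule once.
import Mathlib
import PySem

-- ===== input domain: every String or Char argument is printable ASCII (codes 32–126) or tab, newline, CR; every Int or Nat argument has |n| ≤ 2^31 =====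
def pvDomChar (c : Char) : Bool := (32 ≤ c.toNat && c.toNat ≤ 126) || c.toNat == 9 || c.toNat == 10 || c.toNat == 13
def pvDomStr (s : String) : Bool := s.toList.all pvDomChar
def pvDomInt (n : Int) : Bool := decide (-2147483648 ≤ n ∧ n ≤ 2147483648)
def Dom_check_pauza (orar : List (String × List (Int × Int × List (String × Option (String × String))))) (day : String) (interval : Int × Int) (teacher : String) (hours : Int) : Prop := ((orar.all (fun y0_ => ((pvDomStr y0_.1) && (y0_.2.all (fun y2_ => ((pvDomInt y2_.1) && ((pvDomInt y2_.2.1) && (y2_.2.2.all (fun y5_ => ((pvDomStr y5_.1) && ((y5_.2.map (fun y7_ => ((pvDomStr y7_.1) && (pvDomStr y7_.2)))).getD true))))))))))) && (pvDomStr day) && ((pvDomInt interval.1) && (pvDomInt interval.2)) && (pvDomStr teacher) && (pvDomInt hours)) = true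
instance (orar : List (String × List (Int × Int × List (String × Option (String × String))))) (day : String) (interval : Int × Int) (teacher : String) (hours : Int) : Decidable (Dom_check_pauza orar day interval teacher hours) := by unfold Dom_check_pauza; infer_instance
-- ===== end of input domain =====

-- B fuses A's two phases into one pass: no intermediate list of intervals, a maintained `prev` interval replaces the collected list and the index loop (objective: simpler).

-- ===== PORT A =====
-- shared input decoding: the Python callers pass dicts; the assoc-list arguments are read with Python dict semantics
def pvDayDict (orar : List (String × List (Int × Int × List (String × Option (String × String))))) (day : String) : PySem.Dict (Int × Int) (List (String × Option (String × String))) :=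
  PySem.Dict.ofList (((PySem.Dict.ofList orar).getD day []).map (fun t => ((t.1, t.2.1), t.2.2)))

def check_pauza (orar : List (String × List (Int × Int × List (String × Option (String × String))))) (day : String) (interval : Int × Int) (teacher : String) (hours : Int) : Int :=
  let dayDict := pvDayDict orar day
  -- first loop: collect the intervals at which the teacher appears (duplicates kept, dict order)
  let list_intervals : List (Int × Int) :=
    dayDict.keys.foldl (fun acc itv =>
      let roomDict := PySem.Dict.ofList (dayDict.getD itv [])
      roomDict.keys.foldl (fun acc room =>
        match roomDict.getD room none with
        | some w => if w.1 == teacher then acc ++ [itv] else acc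
        | none => acc) acc) []
  -- second loop: for i in range(0, len-1): compare neighbours
  (PySem.List.pyRange 0 ((list_intervals.length : Int) - 1) 1).foldl
    (fun nr i =>
      if (PySem.List.pyGetD list_intervals (i + 1) (0, 0)).1
           - (PySem.List.pyGetD list_intervals i (0, 0)).2 > hours
      then nr + 1 else nr) 0

-- ===== PORT B =====
def check_pauza_alt (orar : List (String × List (Int × Int × List (String × Option (String × String))))) (day : String) (interval : Int × Int) (teacher : String) (hours : Int) : Int :=
  let dayDict := pvDayDict orar day
  -- single pass: prev = last matching interval so far, nr = gaps counted so far
  (dayDict.items.foldl (fun st kv =>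
    (PySem.Dict.ofList kv.2).values.foldl (fun st v =>
      match v with
      | some w =>
        if w.1 == teacher then
          (some kv.1, st.2 + (match st.1 with
            | some p => if kv.1.1 - p.2 > hours then 1 else 0
            | none => 0))
        else st
      | none => st) st) ((none : Option (Int × Int)), (0 : Int))).2

-- ===== PRECONDITION & SPEC =====
-- Pre_ excludes exactly the inputs where `orar[day]` raises KeyError in Python (both A and B raise there).
def Pre_check_pauza (orar : List (String × List (Int × Int × List (String × Option (String × String))))) (day : String) (interval : Int × Int) (teacher : String) (hours : Int) : Prop :=
  day ∈ orar.map Prod.fst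
instance (orar : List (String × List (Int × Int × List (String × Option (String × String))))) (day : String) (interval : Int × Int) (teacher : String) (hours : Int) : Decidable (Pre_check_pauza orar day interval teacher hours) := by unfold Pre_check_pauza; infer_instance

def pvWitness_check_pauza : (List (String × List (Int × Int × List (String × Option (String × String))))) × String × (Int × Int) × String × Int :=
  ([("Mon", [(1, 2, [("r1", some ("t", "m"))]), (5, 6, [("r1", some ("t", "m"))])])], "Mon", (0, 0), "t", 1)

def Spec_check_pauza (orar : List (String × List (Int × Int × List (String × Option (String × String))))) (day : String) (interval : Int × Int) (teacher : String) (hours : Int) (out : Int) : Prop := out = check_pauza_alt orar day interval teacher hours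
instance (orar : List (String × List (Int × Int × List (String × Option (String × String))))) (day : String) (interval : Int × Int) (teacher : String) (hours : Int) (out : Int) : Decidable (Spec_check_pauza orar day interval teacher hours out) := by unfold Spec_check_pauza; infer_instance

-- ===== CLAIM (what is proved, stated in full; the proofs are below) =====
def Claim_equal_check_pauza : Prop := ∀ (orar : List (String × List (Int × Int × List (String × Option (String × String))))) (day : String) (interval : Int × Int) (teacher : String) (hours : Int), Dom_check_pauza orar day interval teacher hours → Pre_check_pauza orar day interval teacher hours → Spec_check_pauza orar day interval teacher hours (check_pauza orar day interval teacher hours)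

-- ===== LEMMAS AND PROOFS =====

-- selector: does room value v put interval itv into the teacher's list?
def pvSel (teacher : String) (itv : Int × Int) (v : Option (String × String)) : Option (Int × Int) :=
  match v with
  | some w => if w.1 == teacher then some itv else none
  | none => none

-- the list A collects, as one expression
def pvMatches (teacher : String) (d : PySem.Dict (Int × Int) (List (String × Option (String × String)))) : List (Int × Int) :=
  d.keys.flatMap (fun itv => (PySem.Dict.ofList (d.getD itv [])).values.filterMap (pvSel teacher itv))

-- B's per-match state update
def pvGapStep (hours : Int) (st : Option (Int × Int) × Int) (x : Int × Int) : Option (Int × Int) × Int :=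
  (some x, st.2 + (match st.1 with
    | some p => if x.1 - p.2 > hours then 1 else 0
    | none => 0))

-- adjacent-gap count of a list (A's second loop, abstractly)
def pvCountGaps (hours : Int) : List (Int × Int) → Int
  | a :: b :: rest => (if b.1 - a.2 > hours then 1 else 0) + pvCountGaps hours (b :: rest)
  | _ => 0

-- gap count of xs continued from an optional previous interval (B's invariant)
def pvGapsFrom (hours : Int) : Option (Int × Int) → List (Int × Int) → Int
  | _, [] => 0
  | none, x :: xs => pvGapsFrom hours (some x) xs
  | some p, x :: xs => (if x.1 - p.2 > hours then 1 else 0) + pvGapsFrom hours (some x) xs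

theorem pvFoldl_append_match (teacher : String) (itv : Int × Int)
    (g : String → Option (String × String)) :
    ∀ (l : List String) (acc : List (Int × Int)),
      l.foldl (fun acc room => match g room with
        | some w => if w.1 == teacher then acc ++ [itv] else acc
        | none => acc) acc
      = acc ++ l.filterMap (fun room => pvSel teacher itv (g room)) := by
  intro l
  induction l with
  | nil => intro acc; simp
  | cons r l ih =>
    intro acc
    cases hv : g r with
    | none =>
      simp only [List.foldl_cons, hv, List.filterMap_cons, pvSel]
      exact ih acc
    | some w =>
      cases hw : (w.1 == teacher) with
      | true =>
        simp only [List.foldl_cons, hv, List.filterMap_cons, pvSel, hw, if_true]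
        rw [ih]
        simp [pvSel]
      | false =>
        simp only [List.foldl_cons, hv, List.filterMap_cons, pvSel, hw, Bool.false_eq_true,
          if_false]
        exact ih acc

theorem pvFoldl_flatMap {α β γ : Type} (g : α → List β) (f : γ → β → γ) :
    ∀ (l : List α) (init : γ),
      (l.flatMap g).foldl f init = l.foldl (fun st a => (g a).foldl f st) init := by
  intro l
  induction l with
  | nil => intro init; simp
  | cons a l ih => intro init; simp [List.foldl_append, ih]

theorem pvGetD_cons_natCast {α : Type} (x : α) (L : List α) (k : Nat) (d : α) :
    PySem.List.pyGetD (x :: L) ((k : Int) + 1) d = PySem.List.pyGetD L (k : Int) d := by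
  have h : ((k : Int) + 1) = ((k + 1 : Nat) : Int) := by push_cast; ring
  rw [h, PySem.List.pyGetD_natCast, PySem.List.pyGetD_natCast]
  simp [List.getD]

-- A's index loop over range(0, len-1) computes pvCountGaps
theorem pvRangeLoop_eq_countGaps (hours : Int) :
    ∀ (L : List (Int × Int)) (n : Int),
      (PySem.List.pyRange 0 ((L.length : Int) - 1) 1).foldl
        (fun nr i =>
          if (PySem.List.pyGetD L (i + 1) (0, 0)).1
               - (PySem.List.pyGetD L i (0, 0)).2 > hours
          then nr + 1 else nr) n
      = n + pvCountGaps hours L := by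
  intro L
  induction L with
  | nil =>
    intro n
    rw [PySem.List.pyRange_one_eq_nil (by simp)]
    simp [pvCountGaps]
  | cons x L ih =>
    intro n
    cases L with
    | nil =>
      rw [PySem.List.pyRange_one_eq_nil (by simp)]
      simp [pvCountGaps]
    | cons y rest =>
      have hlen : (0 : Int) < ((x :: y :: rest).length : Int) - 1 := by
        simp
      rw [PySem.List.pyRange_one_cons hlen]
      simp only [List.foldl_cons]
      have h0 : PySem.List.pyGetD (x :: y :: rest) ((0 : Int) + 1) (0, 0) = y := by
        rw [show (0 : Int) + 1 = ((1 : Nat) : Int) from by norm_num, PySem.List.pyGetD_natCast]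
        rfl
      have h0' : PySem.List.pyGetD (x :: y :: rest) (0 : Int) (0, 0) = x := by
        rw [show (0 : Int) = ((0 : Nat) : Int) from rfl, PySem.List.pyGetD_natCast]
        rfl
      rw [h0, h0']
      have hshift : PySem.List.pyRange 1 (((y :: rest).length : Int)) 1
          = (PySem.List.pyRange 0 (((y :: rest).length : Int) - 1) 1).map (· + 1) := by
        rw [PySem.List.pyRange_one, PySem.List.pyRange_one, List.map_map]
        rw [show ((y :: rest).length : Int) - 1 - 0 = ((y :: rest).length : Int) - 1 from by ring]
        congr 1
        funext k
        simp
        omega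
      rw [show ((x :: y :: rest).length : Int) - 1 = ((y :: rest).length : Int) from by simp,
          show (0 : Int) + 1 = 1 from by norm_num, hshift, List.foldl_map]
      have hcongr := PySem.List.foldl_congr_mem
        (l := PySem.List.pyRange 0 (((y :: rest).length : Int) - 1) 1)
        (init := (if y.1 - x.2 > hours then n + 1 else n))
        (f := fun (nr : Int) (i : Int) =>
          if (PySem.List.pyGetD (x :: y :: rest) (i + 1 + 1) (0, 0)).1
               - (PySem.List.pyGetD (x :: y :: rest) (i + 1) (0, 0)).2 > hours
          then nr + 1 else nr)
        (g := fun (nr : Int) (i : Int) =>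
          if (PySem.List.pyGetD (y :: rest) (i + 1) (0, 0)).1
               - (PySem.List.pyGetD (y :: rest) i (0, 0)).2 > hours
          then nr + 1 else nr)
        (by
          intro acc i hi
          have h01 : (0 : Int) ≤ i := (PySem.List.mem_pyRange_one.mp hi).1
          obtain ⟨k, rfl⟩ := Int.eq_ofNat_of_zero_le h01
          dsimp only
          rw [show ((k : Int) + 1 + 1) = (((k + 1 : Nat) : Int)) + 1 by push_cast; ring]
          rw [pvGetD_cons_natCast x (y :: rest) (k + 1)]
          rw [pvGetD_cons_natCast x (y :: rest) k]
          push_cast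
          rfl)
      rw [hcongr, ih]
      by_cases hg : y.1 - x.2 > hours <;> simp [pvCountGaps, hg] <;> ring

-- B's state fold computes pvGapsFrom
theorem pvFoldl_gapStep (hours : Int) :
    ∀ (xs : List (Int × Int)) (prev : Option (Int × Int)) (n : Int),
      (xs.foldl (pvGapStep hours) (prev, n)).2 = n + pvGapsFrom hours prev xs := by
  intro xs
  induction xs with
  | nil => intro prev n; simp [pvGapsFrom]
  | cons x xs ih =>
    intro prev n
    cases prev with
    | none => simp [List.foldl_cons, pvGapStep, ih, pvGapsFrom]
    | some p => simp [List.foldl_cons, pvGapStep, ih, pvGapsFrom]; ring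

theorem pvGapsFrom_some (hours : Int) :
    ∀ (xs : List (Int × Int)) (p : Int × Int),
      pvGapsFrom hours (some p) xs = pvCountGaps hours (p :: xs) := by
  intro xs
  induction xs with
  | nil => intro p; simp [pvGapsFrom, pvCountGaps]
  | cons x xs ih => intro p; simp [pvGapsFrom, pvCountGaps, ih]

theorem pvGapsFrom_none (hours : Int) (xs : List (Int × Int)) :
    pvGapsFrom hours none xs = pvCountGaps hours xs := by
  cases xs with
  | nil => rfl
  | cons x xs => simp [pvGapsFrom, pvGapsFrom_some]

-- A's first loop collects pvMatches
theorem pvA_list (teacher : String)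
    (d : PySem.Dict (Int × Int) (List (String × Option (String × String)))) :
    d.keys.foldl (fun acc itv =>
      let roomDict := PySem.Dict.ofList (d.getD itv [])
      roomDict.keys.foldl (fun acc room =>
        match roomDict.getD room none with
        | some w => if w.1 == teacher then acc ++ [itv] else acc
        | none => acc) acc) []
    = pvMatches teacher d := by
  have hinner : ∀ (itv : Int × Int) (acc : List (Int × Int)),
      (let roomDict := PySem.Dict.ofList (d.getD itv [])
       roomDict.keys.foldl (fun acc room =>
        match roomDict.getD room none with
        | some w => if w.1 == teacher then acc ++ [itv] else acc
        | none => acc) acc)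
      = acc ++ (PySem.Dict.ofList (d.getD itv [])).values.filterMap (pvSel teacher itv) := by
    intro itv acc
    dsimp only
    have hnd := PySem.Dict.nodup_keys_ofList (d.getD itv [])
    rw [PySem.Dict.values_eq_map_keys _ hnd none, List.filterMap_map]
    exact pvFoldl_append_match teacher itv _ _ acc
  calc d.keys.foldl _ []
      = d.keys.foldl (fun acc itv =>
          acc ++ (PySem.Dict.ofList (d.getD itv [])).values.filterMap (pvSel teacher itv)) [] := by
        refine PySem.List.foldl_congr_mem _ _ _ _ ?_
        intro acc itv _
        exact hinner itv acc
    _ = pvMatches teacher d := by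
        rw [PySem.List.foldl_append_eq_flatMap]; simp [pvMatches]

-- B's nested fold equals the pvGapStep fold over pvMatches
theorem pvB_fold (teacher : String) (hours : Int)
    (d : PySem.Dict (Int × Int) (List (String × Option (String × String))))
    (hnd : d.keys.Nodup) :
    d.items.foldl (fun st kv =>
      (PySem.Dict.ofList kv.2).values.foldl (fun st v =>
        match v with
        | some w =>
          if w.1 == teacher then
            (some kv.1, st.2 + (match st.1 with
              | some p => if kv.1.1 - p.2 > hours then 1 else 0
              | none => 0))
          else st
        | none => st) st) ((none : Option (Int × Int)), (0 : Int))
    = (pvMatches teacher d).foldl (pvGapStep hours) ((none : Option (Int × Int)), (0 : Int)) := by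
  rw [PySem.Dict.items_eq_map_keys d hnd [], List.foldl_map]
  have hinner : ∀ (itv : Int × Int) (st : Option (Int × Int) × Int),
      (PySem.Dict.ofList (d.getD itv [])).values.foldl (fun st v =>
        match v with
        | some w =>
          if w.1 == teacher then
            (some itv, st.2 + (match st.1 with
              | some p => if itv.1 - p.2 > hours then 1 else 0
              | none => 0))
          else st
        | none => st) st
      = ((PySem.Dict.ofList (d.getD itv [])).values.filterMap (pvSel teacher itv)).foldl
          (pvGapStep hours) st := by
    intro itv st
    rw [List.foldl_filterMap]
    congr 1
    funext st v
    cases v with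
    | none => simp [pvSel]
    | some w => by_cases hw : w.1 == teacher <;> simp [pvSel, hw, pvGapStep]
  rw [pvMatches, pvFoldl_flatMap]
  dsimp only
  refine PySem.List.foldl_congr_mem _ _ _ _ ?_
  intro st itv _
  exact hinner itv st

-- ===== VERDICT (by name: the statement is the Claim_ definition above) =====
theorem check_pauza_spec : Claim_equal_check_pauza := by
  intro orar day interval teacher hours _hdom _hpre
  unfold Spec_check_pauza check_pauza check_pauza_alt
  dsimp only
  have hnd : (pvDayDict orar day).keys.Nodup := by
    unfold pvDayDict
    exact PySem.Dict.nodup_keys_ofList _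
  rw [pvA_list teacher (pvDayDict orar day)]
  rw [pvB_fold teacher hours (pvDayDict orar day) hnd]
  rw [pvRangeLoop_eq_countGaps hours (pvMatches teacher (pvDayDict orar day)) 0]
  rw [pvFoldl_gapStep hours (pvMatches teacher (pvDayDict orar day)) none 0]
  rw [pvGapsFrom_none]
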